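-- pv_equiv track=rewrite | github.com/emzam/University_Projects | Third_year/Python/Oblig1/Oblig1.py | recombine_parents
-- ===== SOURCE A (Python) =====
-- def recombine_parents(parents):
--     xPairs = len(parents);
--     pairs = [];
--
--     i = 0;
--     while i < xPairs-1:
--         pairs.append([parents[i], parents[i+1]]);
--         i += 2;
--
--     return pairs;
-- ===== SOURCE B (Python) =====
-- def recombine_parents(parents):
--     return [[a, b] for a, b in zip(parents[::2], parents[1::2])]
-- ===== Notes on version B (the rewrite author's own statement) =====
-- stated objective: idiomatic
-- what changed: Replaces the index-based while loop with append by zipping the two strided slices parents[::2] and parents[1::2] into pair lists; zip's truncation at the shorter slice drops the last element of odd-length inputs exactly as A does.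
import Mathlib
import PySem

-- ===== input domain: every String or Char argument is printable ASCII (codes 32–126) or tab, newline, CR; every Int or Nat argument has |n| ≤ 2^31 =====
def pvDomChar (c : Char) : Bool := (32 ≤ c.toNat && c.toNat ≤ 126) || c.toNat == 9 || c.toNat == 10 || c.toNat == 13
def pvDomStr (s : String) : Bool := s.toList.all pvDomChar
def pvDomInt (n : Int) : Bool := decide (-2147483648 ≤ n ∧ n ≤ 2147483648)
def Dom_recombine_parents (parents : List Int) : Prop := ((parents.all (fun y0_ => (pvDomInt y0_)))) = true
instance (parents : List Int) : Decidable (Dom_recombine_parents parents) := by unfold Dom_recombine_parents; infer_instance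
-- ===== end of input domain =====

-- B replaces A's index-stepping while loop with a zip of the even- and odd-index strided slices (idiomatic; return value only).

-- ===== PORT A =====
-- the while loop: i stepping by 2 while i < len(parents) - 1, appending [parents[i], parents[i+1]]
def recombineLoopA (parents : List Int) (i : Nat) (pairs : List (List Int)) : List (List Int) :=
  if i < parents.length - 1 then
    recombineLoopA parents (i + 2)
      (pairs ++ [[(PySem.List.pyGet? parents (i : Int)).getD 0,
                  (PySem.List.pyGet? parents ((i : Int) + 1)).getD 0]])
  else pairs
termination_by parents.length - i

def recombine_parents (parents : List Int) : List (List Int) :=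
  recombineLoopA parents 0 []

-- ===== PORT B =====
-- hand port of the step-2 slices xs[::2] and xs[1::2] (exact: every second element starting at 0 / 1)
def strideTwo : List Int → List Int
  | [] => []
  | [a] => [a]
  | a :: _ :: rest => a :: strideTwo rest

def recombine_parents_alt (parents : List Int) : List (List Int) :=
  List.zipWith (fun a b => [a, b]) (strideTwo parents) (strideTwo parents.tail)

-- ===== PRECONDITION & SPEC =====
def Spec_recombine_parents (parents : List Int) (out : List (List Int)) : Prop := out = recombine_parents_alt parents
instance (parents : List Int) (out : List (List Int)) : Decidable (Spec_recombine_parents parents out) := by unfold Spec_recombine_parents; infer_instance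

-- ===== CLAIM (what is proved, stated in full; the proofs are below) =====
def Claim_equal_recombine_parents : Prop := ∀ (parents : List Int), Dom_recombine_parents parents → Spec_recombine_parents parents (recombine_parents parents)

-- ===== LEMMAS AND PROOFS =====
-- the common pair recursion both ports compute
def pairRec : List Int → List (List Int)
  | [] => []
  | [_] => []
  | a :: b :: rest => [a, b] :: pairRec rest

theorem strideTwo_cons (a : Int) (l : List Int) : strideTwo (a :: l) = a :: strideTwo l.tail := by
  cases l <;> rfl

theorem alt_eq_pairRec (l : List Int) : recombine_parents_alt l = pairRec l := by
  unfold recombine_parents_alt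
  induction l using pairRec.induct with
  | case1 => simp [strideTwo, pairRec]
  | case2 a => simp [strideTwo, pairRec]
  | case3 a b rest ih =>
      simp only [List.tail_cons, strideTwo_cons, List.zipWith_cons_cons, pairRec]
      exact congrArg _ ih

theorem loopA_eq (l : List Int) (i : Nat) (acc : List (List Int)) :
    recombineLoopA l i acc = acc ++ pairRec (l.drop i) := by
  induction i, acc using recombineLoopA.induct l with
  | case1 i acc h ih =>
      rw [recombineLoopA, if_pos h, ih]
      have hi : i < l.length := by omega
      have hi1 : i + 1 < l.length := by omega
      have hdrop : l.drop i = l[i] :: l[i+1] :: l.drop (i + 2) := by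
        rw [List.drop_eq_getElem_cons hi, List.drop_eq_getElem_cons hi1]
      rw [hdrop]
      have hc : ((i : Int) + 1) = ((i + 1 : Nat) : Int) := by push_cast; ring
      have h1 : PySem.List.pyGet? l (i : Int) = some l[i] := by
        rw [PySem.List.pyGet?_natCast]; exact List.getElem?_eq_getElem hi
      have h2 : PySem.List.pyGet? l ((i : Int) + 1) = some l[i + 1] := by
        rw [hc, PySem.List.pyGet?_natCast]; exact List.getElem?_eq_getElem hi1
      rw [h1, h2]
      simp [pairRec]
  | case2 i acc h =>
      rw [recombineLoopA, if_neg h]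
      have : pairRec (l.drop i) = [] := by
        have hlen : (l.drop i).length ≤ 1 := by simp [List.length_drop]; omega
        match hd : l.drop i with
        | [] => rfl
        | [a] => rfl
        | a :: b :: r => rw [hd] at hlen; simp at hlen
      rw [this, List.append_nil]

-- ===== VERDICT (by name: the statement is the Claim_ definition above) =====
theorem recombine_parents_spec : Claim_equal_recombine_parents := by
  intro parents _
  unfold Spec_recombine_parents recombine_parents
  rw [loopA_eq, alt_eq_pairRec]
  simp
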